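-- pv_equiv track=rewrite | github.com/KardelRuveyda/uretken-yapayzeka-chatbot-gelistirme-temelleri | homeworks/ytu/Makbule_Berber/Makbule_Berber/sifre_kirici.py | sifre_coz
-- ===== SOURCE A (Python) =====
-- def sifre_coz(sifreli_metin):
--     alphabet = "abcdefghijklmnopqrstuvwxyz"
--     cozulmus_metin = ""
--
--     for char in sifreli_metin:
--         if char in alphabet:
--             index = alphabet.index(char) - 5
--             cozulmus_metin += alphabet[index]
--         elif char in alphabet.upper():
--             index = alphabet.upper().index(char) - 5
--             cozulmus_metin += alphabet.upper()[index]
--         elif char.isdigit():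
--             cozulmus_metin = char + cozulmus_metin
--         else:
--             cozulmus_metin += char
--
--     return cozulmus_metin
-- ===== SOURCE B (Python) =====
-- def sifre_coz(sifreli_metin):
--     alphabet = "abcdefghijklmnopqrstuvwxyz"
--     shifted = alphabet[-5:] + alphabet[:-5]
--     table = str.maketrans(alphabet + alphabet.upper(),
--                           shifted + shifted.upper(), "0123456789")
--     digits = ''.join(filter(str.isdigit, sifreli_metin))
--     return digits[::-1] + sifreli_metin.translate(table)
-- ===== Notes on version B (the rewrite author's own statement) =====
-- stated objective: faster
-- what changed: A precomputed str.maketrans translation table (letters shifted by -5, digits deleted) applied to the whole string, plus one filter pass collecting the digits reversed once at the end, replaces A's per-character loop that re-builds the accumulator string on every digit and scans the alphabet with .index for every letter.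
import Mathlib
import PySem

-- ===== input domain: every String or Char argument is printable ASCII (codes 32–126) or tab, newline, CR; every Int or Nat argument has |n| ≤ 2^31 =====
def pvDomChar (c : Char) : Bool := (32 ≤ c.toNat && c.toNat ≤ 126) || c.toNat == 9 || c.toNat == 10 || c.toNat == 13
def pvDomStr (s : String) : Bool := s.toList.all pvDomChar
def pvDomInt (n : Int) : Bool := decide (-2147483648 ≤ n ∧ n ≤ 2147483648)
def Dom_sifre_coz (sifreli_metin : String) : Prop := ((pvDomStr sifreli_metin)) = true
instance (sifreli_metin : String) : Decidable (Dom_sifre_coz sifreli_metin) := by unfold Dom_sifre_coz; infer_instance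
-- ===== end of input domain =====

-- B replaces A's per-character loop (string re-building on every digit, alphabet.index
-- scans per letter) by a precomputed translation table applied to the whole string, with
-- the digits filtered out separately and reversed once; objective: faster (measured).

-- ===== PORT A =====
-- alphabet = "abcdefghijklmnopqrstuvwxyz"
def pvAlpha : List Char := "abcdefghijklmnopqrstuvwxyz".toList
-- alphabet.upper() (A recomputes it each time; it is a constant, named here once)
def pvAlphaUp : List Char := PySem.Chars.upper pvAlpha

-- alphabet[alphabet.index(char) - 5]; the .getD are unreachable defaults: under the guard
-- 'char in alphabet' index? is some i with i < 26, and -5 ≤ i - 5 < 26 so pyGet? is some.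
def pvShiftLow (c : Char) : Char :=
  (PySem.List.pyGet? pvAlpha (((PySem.List.index? pvAlpha c).getD 0 : Int) - 5)).getD c
def pvShiftUp (c : Char) : Char :=
  (PySem.List.pyGet? pvAlphaUp (((PySem.List.index? pvAlphaUp c).getD 0 : Int) - 5)).getD c

-- the loop body of A (cozulmus_metin is the accumulator, as a List Char)
def pvStepA (acc : List Char) (c : Char) : List Char :=
  if PySem.Chars.isIn [c] pvAlpha then acc ++ [pvShiftLow c]
  else if PySem.Chars.isIn [c] pvAlphaUp then acc ++ [pvShiftUp c]
  else if PySem.Chars.isdigit c then c :: acc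
  else acc ++ [c]

def sifre_coz (sifreli_metin : String) : String :=
  String.ofList (sifreli_metin.toList.foldl pvStepA [])

-- ===== PORT B =====
-- "0123456789" (the maketrans deletion string)
def pvDigits : List Char := "0123456789".toList
-- alphabet (B's own constant)
def pvLowerB : List Char := "abcdefghijklmnopqrstuvwxyz".toList
-- shifted = alphabet[-5:] + alphabet[:-5]
def pvShifted : List Char :=
  PySem.List.slice pvLowerB (some (-5)) none ++ PySem.List.slice pvLowerB none (some (-5))
-- str.maketrans(alphabet + alphabet.upper(), shifted + shifted.upper(), "0123456789"):
-- a mapping whose value 'some d' replaces by d and 'none' deletes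
def pvTable : PySem.Dict Char (Option Char) :=
  PySem.Dict.ofList
    (((pvLowerB ++ PySem.Chars.upper pvLowerB).zip
        ((pvShifted ++ PySem.Chars.upper pvShifted).map some))
      ++ pvDigits.map (fun c => (c, (none : Option Char))))
-- s.translate(table): replace, delete, or keep each character
def pvTranslate (cs : List Char) : List Char :=
  cs.flatMap (fun c =>
    match pvTable.get? c with
    | some (some d) => [d]
    | some none => []
    | none => [c])

def sifre_coz_alt (sifreli_metin : String) : String :=
  String.ofList
    (((sifreli_metin.toList.filter (fun c => PySem.Chars.isdigit c)).reverse)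
      ++ pvTranslate sifreli_metin.toList)

-- ===== PRECONDITION & SPEC =====
def Spec_sifre_coz (sifreli_metin : String) (out : String) : Prop := out = sifre_coz_alt sifreli_metin
instance (sifreli_metin : String) (out : String) : Decidable (Spec_sifre_coz sifreli_metin out) := by unfold Spec_sifre_coz; infer_instance

-- ===== CLAIM (what is proved, stated in full; the proofs are below) =====
def Claim_equal_sifre_coz : Prop := ∀ (sifreli_metin : String), Dom_sifre_coz sifreli_metin → Spec_sifre_coz sifreli_metin (sifre_coz sifreli_metin)

-- ===== LEMMAS AND PROOFS =====

-- per-character value of B's translate table (keep when absent)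
def pvMapB (c : Char) : Char :=
  match pvTable.get? c with
  | some (some d) => d
  | _ => c

-- single-character 'in' on a string is list membership
lemma pv_isIn_singleton (c : Char) (l : List Char) :
    PySem.Chars.isIn [c] l = true ↔ c ∈ l := by
  rw [PySem.Chars.isIn_iff_infix]
  exact List.singleton_infix_iff c l

-- the finite per-letter checks, evaluated as Boolean 'all's so 'decide' stays shallow
set_option maxRecDepth 8192 in
lemma pv_low_bool :
    (pvAlpha.all fun c => !PySem.Chars.isdigit c && (pvShiftLow c == pvMapB c)
      && !(pvTable.get? c == some none)) = true := by decide

set_option maxRecDepth 8192 in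
lemma pv_up_bool :
    (pvAlphaUp.all fun c => !PySem.Chars.isdigit c && (pvShiftUp c == pvMapB c)
      && !(pvTable.get? c == some none)) = true := by decide

set_option maxRecDepth 8192 in
lemma pv_digit_bool :
    (pvDigits.all fun c => PySem.Chars.isdigit c && (pvTable.get? c == some none)) = true := by
  decide

set_option maxRecDepth 8192 in
lemma pv_keys : pvTable.keys = pvAlpha ++ pvAlphaUp ++ pvDigits := by decide

lemma pv_low_facts : ∀ c ∈ pvAlpha,
    PySem.Chars.isdigit c = false ∧ pvShiftLow c = pvMapB c ∧ pvTable.get? c ≠ some none := by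
  have h := pv_low_bool
  rw [List.all_eq_true] at h
  intro c hc
  simpa only [Bool.and_eq_true, Bool.not_eq_true', beq_iff_eq, beq_eq_false_iff_ne, ne_eq,
    and_assoc] using h c hc

lemma pv_up_facts : ∀ c ∈ pvAlphaUp,
    PySem.Chars.isdigit c = false ∧ pvShiftUp c = pvMapB c ∧ pvTable.get? c ≠ some none := by
  have h := pv_up_bool
  rw [List.all_eq_true] at h
  intro c hc
  simpa only [Bool.and_eq_true, Bool.not_eq_true', beq_iff_eq, beq_eq_false_iff_ne, ne_eq,
    and_assoc] using h c hc

lemma pv_digit_facts : ∀ c ∈ pvDigits,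
    PySem.Chars.isdigit c = true ∧ pvTable.get? c = some none := by
  have h := pv_digit_bool
  rw [List.all_eq_true] at h
  intro c hc
  simpa only [Bool.and_eq_true, beq_iff_eq] using h c hc

-- a char the isdigit test accepts is one of the ten digit characters
lemma pv_mem_digits (c : Char) (h : PySem.Chars.isdigit c = true) : c ∈ pvDigits := by
  simp only [PySem.Chars.isdigit, Bool.and_eq_true, decide_eq_true_eq] at h
  obtain ⟨h1, h2⟩ := h
  rw [Char.le_def, UInt32.le_iff_toNat_le] at h1 h2
  have h1' : 48 ≤ c.toNat := h1
  have h2' : c.toNat ≤ 57 := h2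
  have hc : c = Char.ofNat c.toNat := (Char.ofNat_toNat c).symm
  interval_cases h : c.toNat <;> rw [hc] <;> decide

-- a char in the table is a letter or a digit
lemma pv_mem_keys (c : Char) (v : Option Char) (h : pvTable.get? c = some v) :
    c ∈ pvAlpha ∨ c ∈ pvAlphaUp ∨ c ∈ pvDigits := by
  have hk : c ∈ pvTable.keys := by
    by_contra hmem
    rw [← PySem.Dict.get?_eq_none_iff_not_mem_keys] at hmem
    simp [hmem] at h
  rw [pv_keys] at hk
  simpa [List.mem_append, or_assoc] using hk

-- digits are exactly the deleted entries of the table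
lemma pv_get_digit (c : Char) (h : PySem.Chars.isdigit c = true) :
    pvTable.get? c = some none :=
  (pv_digit_facts c (pv_mem_digits c h)).2

lemma pv_get_nondigit (c : Char) (h : PySem.Chars.isdigit c = false) :
    pvTable.get? c ≠ some none := by
  intro hg
  rcases pv_mem_keys c none hg with hm | hm | hm
  · exact (pv_low_facts c hm).2.2 hg
  · exact (pv_up_facts c hm).2.2 hg
  · have := (pv_digit_facts c hm).1
    rw [h] at this
    exact Bool.false_ne_true this

-- a non-letter, non-digit char is not in the table, so B keeps it
lemma pv_mapB_other (c : Char) (hl : c ∉ pvAlpha) (hu : c ∉ pvAlphaUp)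
    (hd : PySem.Chars.isdigit c = false) : pvTable.get? c = none := by
  cases hg : pvTable.get? c with
  | none => rfl
  | some v =>
    rcases pv_mem_keys c v hg with hm | hm | hm
    · exact absurd hm hl
    · exact absurd hm hu
    · have := (pv_digit_facts c hm).1
      rw [hd] at this
      exact absurd this Bool.false_ne_true

-- A's branch chain, re-expressed through B's per-char map
lemma pv_stepA_eq (acc : List Char) (c : Char) :
    pvStepA acc c = if PySem.Chars.isdigit c then c :: acc else acc ++ [pvMapB c] := by
  by_cases hl : PySem.Chars.isIn [c] pvAlpha = true
  · obtain ⟨hd, hm, -⟩ := pv_low_facts c ((pv_isIn_singleton c pvAlpha).1 hl)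
    simp [pvStepA, hl, hd, hm]
  · by_cases hu : PySem.Chars.isIn [c] pvAlphaUp = true
    · obtain ⟨hd, hm, -⟩ := pv_up_facts c ((pv_isIn_singleton c pvAlphaUp).1 hu)
      simp [pvStepA, hl, hu, hd, hm]
    · by_cases hd : PySem.Chars.isdigit c = true
      · simp [pvStepA, hl, hu, hd]
      · have hd' : PySem.Chars.isdigit c = false := by simpa using hd
        have hml : c ∉ pvAlpha := fun hm => hl ((pv_isIn_singleton c pvAlpha).2 hm)
        have hmu : c ∉ pvAlphaUp := fun hm => hu ((pv_isIn_singleton c pvAlphaUp).2 hm)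
        have hmap : pvMapB c = c := by
          unfold pvMapB
          rw [pv_mapB_other c hml hmu hd']
        simp [pvStepA, hl, hu, hd', hmap]

-- A's whole loop: digits so far (d, reversed on the left), other output so far (r)
lemma pv_foldA (cs : List Char) : ∀ (d r : List Char),
    cs.foldl pvStepA (d.reverse ++ r) =
      (d ++ cs.filter (fun c => PySem.Chars.isdigit c)).reverse ++ r
        ++ (cs.filter (fun c => !PySem.Chars.isdigit c)).map pvMapB := by
  induction cs with
  | nil => intro d r; simp
  | cons c cs ih =>
    intro d r
    rw [List.foldl_cons, pv_stepA_eq]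
    by_cases h : PySem.Chars.isdigit c = true
    · have : c :: (d.reverse ++ r) = (d ++ [c]).reverse ++ r := by simp
      simp only [if_true, this, ih (d ++ [c]) r, List.filter_cons, h, Bool.not_true]
      simp [List.append_assoc]
    · have hb : PySem.Chars.isdigit c = false := by simpa using h
      have : (d.reverse ++ r) ++ [pvMapB c] = d.reverse ++ (r ++ [pvMapB c]) := by simp
      simp only [Bool.false_eq_true, if_false, this, ih d (r ++ [pvMapB c]),
        List.filter_cons, hb, Bool.not_false]
      simp [List.append_assoc]

-- B's translate drops the digits and maps everything else
lemma pv_translate_eq (cs : List Char) :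
    pvTranslate cs = (cs.filter (fun c => !PySem.Chars.isdigit c)).map pvMapB := by
  induction cs with
  | nil => rfl
  | cons c cs ih =>
    by_cases h : PySem.Chars.isdigit c = true
    · simp only [pvTranslate, List.flatMap_cons, pv_get_digit c h, List.filter_cons, h,
        Bool.not_true]
      simpa [pvTranslate] using ih
    · have hb : PySem.Chars.isdigit c = false := by simpa using h
      have hone : (match pvTable.get? c with
          | some (some d) => [d]
          | some none => []
          | none => [c]) = [pvMapB c] := by
        have hne := pv_get_nondigit c hb
        cases hg : pvTable.get? c with
        | none =>
          have hm : pvMapB c = c := by unfold pvMapB; rw [hg]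
          rw [hm]
        | some v =>
          cases v with
          | none => exact absurd hg hne
          | some d =>
            have hm : pvMapB c = d := by unfold pvMapB; rw [hg]
            rw [hm]
      simp only [pvTranslate, List.flatMap_cons, hone, List.filter_cons, hb, Bool.not_false]
      simpa [pvTranslate] using ih

-- ===== VERDICT (by name: the statement is the Claim_ definition above) =====
theorem sifre_coz_spec : Claim_equal_sifre_coz := by
  intro s _
  unfold Spec_sifre_coz sifre_coz sifre_coz_alt
  have hA := pv_foldA s.toList [] []
  simp only [List.reverse_nil, List.nil_append, List.append_nil] at hA
  rw [hA, pv_translate_eq]
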